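-- pv_equiv track=rewrite | github.com/dongnami/DOS | utils/parser.py | find_matching_indices
-- ===== SOURCE A (Python) =====
-- def find_matching_indices(indices, decoded_words, target_word):
--     target_word = target_word.replace(" ", "") # we don't include spacebar in the target word.
--     if not indices or not decoded_words:
--         return []
--
--     groups = []
--     current_group_indices = [indices[0]]
--     current_group_words = [decoded_words[0]]
--
--     for i in range(1, len(indices)):
--         if indices[i] == indices[i - 1] + 1:
--             current_group_indices.append(indices[i])
--             current_group_words.append(decoded_words[i])
--         else:
--             groups.append((current_group_indices, current_group_words))
--             current_group_indices = [indices[i]]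
--             current_group_words = [decoded_words[i]]
--     groups.append((current_group_indices, current_group_words))
--
--     for group_indices, group_words in groups:
--         n = len(group_words)
--         for i in range(n):
--             concatenation = ""
--             for j in range(i, n):
--                 concatenation += group_words[j]
--                 if concatenation == target_word:
--                     return group_indices[i:j+1]
--     return []
-- ===== SOURCE B (Python) =====
-- def find_matching_indices(indices, decoded_words, target_word):
--     # Single pass over start positions with a length-based run scan:
--     # instead of building explicit groups and comparing a growing concatenation
--     # at every step, walk the run accumulating only word LENGTHS until they
--     # reach len(target), then do one string comparison per start position.
--     target = target_word.replace(" ", "")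
--     if not indices or not decoded_words:
--         return []
--     L = len(target)
--     n = len(indices)
--     for i in range(n):
--         total = len(decoded_words[i])
--         j = i
--         while total < L and j + 1 < n and indices[j + 1] == indices[j] + 1:
--             j += 1
--             total += len(decoded_words[j])
--         if total == L and "".join(decoded_words[i:j + 1]) == target:
--             return indices[i:j + 1]
--     return []
-- ===== Notes on version B (the rewrite author's own statement) =====
-- stated objective: faster
-- what changed: B drops A's explicit group-building pass and its quadratic rebuild-and-compare of growing concatenations: it scans start positions once, walks each consecutive run accumulating only word lengths until they reach len(target), and performs a single string comparison per start.
import Mathlib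
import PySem

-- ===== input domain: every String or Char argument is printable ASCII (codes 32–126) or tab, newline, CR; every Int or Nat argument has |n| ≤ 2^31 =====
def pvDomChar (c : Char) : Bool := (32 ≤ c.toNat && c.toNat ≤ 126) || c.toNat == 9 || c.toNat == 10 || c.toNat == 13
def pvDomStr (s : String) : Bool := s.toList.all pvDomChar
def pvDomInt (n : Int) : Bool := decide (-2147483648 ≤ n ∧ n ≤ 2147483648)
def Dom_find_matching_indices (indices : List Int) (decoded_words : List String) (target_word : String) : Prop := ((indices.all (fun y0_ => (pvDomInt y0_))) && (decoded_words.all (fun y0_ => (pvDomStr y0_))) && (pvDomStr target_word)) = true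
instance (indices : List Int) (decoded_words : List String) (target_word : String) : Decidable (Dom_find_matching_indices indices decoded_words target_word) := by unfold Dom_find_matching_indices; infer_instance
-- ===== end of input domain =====

-- B replaces A's group-building pass and its repeated compares of a growing concatenation by a
-- single scan over start positions that walks each consecutive run on word LENGTHS and does one
-- string comparison per start (measured faster; Pre_ only excludes inputs where A raises IndexError).


-- ===== PORT A =====
-- A's grouping loop 'for i in range(1, len(indices))' reads only indices[i-1], indices[i] and
-- decoded_words[i]; it is transcribed as recursion over the remaining (index, word) pairs
-- carrying the previous index, with the same state (groups, current_group_indices/_words).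
def pvA_group (prev : Int) (rest : List (Int × String))
    (groups : List (List Int × List String)) (ci : List Int) (cw : List String) :
    List (List Int × List String) :=
  match rest with
  | [] => groups ++ [(ci, cw)]
  | (ix, w) :: r =>
      if ix = prev + 1 then pvA_group ix r groups (ci ++ [ix]) (cw ++ [w])
      else pvA_group ix r (groups ++ [(ci, cw)]) [ix] [w]

-- inner loop 'for j in range(i, n)' with the growing concatenation; ws = group_words[j:]
def pvA_scanJ (gi : List Int) (tgt : List Char) (i j : Nat) (c : List Char) :
    List String → Option (List Int)
  | [] => none
  | w :: ws =>
      let c' := c ++ w.toList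
      if c' = tgt then some (PySem.List.slice gi (some (i : Int)) (some ((j : Int) + 1)))
      else pvA_scanJ gi tgt i (j + 1) c' ws

-- loop 'for i in range(n)' with early return; the list argument is group_words[i:]
def pvA_scanI (gi : List Int) (tgt : List Char) (i : Nat) :
    List String → Option (List Int)
  | [] => none
  | w :: ws =>
      match pvA_scanJ gi tgt i i [] (w :: ws) with
      | some r => some r
      | none => pvA_scanI gi tgt (i + 1) ws

-- loop 'for group_indices, group_words in groups' with early return
def pvA_search (groups : List (List Int × List String)) (tgt : List Char) : Option (List Int) :=
  match groups with
  | [] => none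
  | (gi, gw) :: gs =>
      match pvA_scanI gi tgt 0 gw with
      | some r => some r
      | none => pvA_search gs tgt

def find_matching_indices (indices : List Int) (decoded_words : List String)
    (target_word : String) : List Int :=
  let tgt := PySem.Chars.replace target_word.toList [' '] []
  match indices, decoded_words with
  | [], _ => []
  | _ :: _, [] => []
  | i0 :: _, w0 :: _ =>
      let pairs := indices.zip decoded_words
      let groups := pvA_group i0 pairs.tail [] [i0] [w0]
      (pvA_search groups tgt).getD []

-- ===== PORT B =====
-- the 'while total < L and j+1 < n and indices[j+1]==indices[j]+1' loop; list accesses are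
-- exact here because the loop condition guards j+1 < n (= indices length) before any access
def pvB_extend (idx : List Int) (dw : List String) (L : Nat) (j total : Nat) : Nat × Nat :=
  if _h : j + 1 < idx.length then
    if total < L ∧ idx[j+1]?.getD 0 = idx[j]?.getD 0 + 1 then
      pvB_extend idx dw L (j + 1) (total + (dw[j+1]?.getD "").toList.length)
    else (j, total)
  else (j, total)
termination_by idx.length - j

-- the 'for i in range(n)' loop with early return; decoded_words[i] is exact on Pre_
-- (there len(indices) ≤ len(decoded_words), so i < n is in range for both lists)
def pvB_scan (idx : List Int) (dw : List String) (tgt : List Char) (L : Nat) (i : Nat) :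
    Option (List Int) :=
  if _h : i < idx.length then
    let st := pvB_extend idx dw L i (dw[i]?.getD "").toList.length
    if st.2 = L ∧ PySem.Chars.join []
        ((PySem.List.slice dw (some (i : Int)) (some ((st.1 : Int) + 1))).map String.toList) = tgt then
      some (PySem.List.slice idx (some (i : Int)) (some ((st.1 : Int) + 1)))
    else pvB_scan idx dw tgt L (i + 1)
  else none
termination_by idx.length - i

def find_matching_indices_alt (indices : List Int) (decoded_words : List String)
    (target_word : String) : List Int :=
  let tgt := PySem.Chars.replace target_word.toList [' '] []
  if indices.isEmpty || decoded_words.isEmpty then []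
  else (pvB_scan indices decoded_words tgt tgt.length 0).getD []

-- ===== PRECONDITION & SPEC =====
-- Pre_ excludes exactly the inputs where A raises IndexError (both lists nonempty and
-- decoded_words shorter than indices); nothing on which A returns is excluded.
def Pre_find_matching_indices (indices : List Int) (decoded_words : List String) (target_word : String) : Prop :=
  indices = [] ∨ decoded_words = [] ∨ indices.length ≤ decoded_words.length
instance (indices : List Int) (decoded_words : List String) (target_word : String) : Decidable (Pre_find_matching_indices indices decoded_words target_word) := by unfold Pre_find_matching_indices; infer_instance

def pvWitness_find_matching_indices : List Int × List String × String := ([3, 4, 5], ["ab", "c", "d"], "abc")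

def Spec_find_matching_indices (indices : List Int) (decoded_words : List String) (target_word : String) (out : List Int) : Prop := out = find_matching_indices_alt indices decoded_words target_word
instance (indices : List Int) (decoded_words : List String) (target_word : String) (out : List Int) : Decidable (Spec_find_matching_indices indices decoded_words target_word out) := by unfold Spec_find_matching_indices; infer_instance

-- ===== CLAIM (what is proved, stated in full; the proofs are below) =====
def Claim_equal_find_matching_indices : Prop := ∀ (indices : List Int) (decoded_words : List String) (target_word : String), Dom_find_matching_indices indices decoded_words target_word → Pre_find_matching_indices indices decoded_words target_word → Spec_find_matching_indices indices decoded_words target_word (find_matching_indices indices decoded_words target_word)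

-- ===== LEMMAS AND PROOFS =====

-- Reference search both ports are reduced to: try each start position in order; from a start,
-- walk only while indices stay consecutive, comparing the concatenation after each word.
def refRest (tgt c : List Char) (prev : Int) : List (Int × String) → Option (List Int)
  | [] => none
  | (ix, w) :: r =>
      if ix = prev + 1 then
        let c' := c ++ w.toList
        if c' = tgt then some [ix] else (refRest tgt c' ix r).map (ix :: ·)
      else none

def refStart (tgt : List Char) : List (Int × String) → Option (List Int)
  | [] => none
  | (ix, w) :: r =>
      if w.toList = tgt then some [ix] else (refRest tgt w.toList ix r).map (ix :: ·)

def refScan (tgt : List Char) : List (Int × String) → Option (List Int)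
  | [] => none
  | p :: r => (refStart tgt (p :: r)).orElse (fun _ => refScan tgt r)

-- run-scan with the consecutiveness guard dropped (what A's inner loop does inside one group)
def scanRun (tgt c : List Char) : List (Int × String) → Option (List Int)
  | [] => none
  | (ix, w) :: r =>
      let c' := c ++ w.toList
      if c' = tgt then some [ix] else (scanRun tgt c' r).map (ix :: ·)

-- pair-level model of B's two loops, the stepping stone between pvB_scan and refScan
def pvZ_extend (L : Nat) (j total : Nat) : List (Int × String) → Nat × Nat
  | p0 :: p1 :: r =>
      if total < L ∧ p1.1 = p0.1 + 1 then
        pvZ_extend L (j + 1) (total + p1.2.toList.length) (p1 :: r)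
      else (j, total)
  | _ => (j, total)

def pvZ_scanI (pairs : List (Int × String)) (tgt : List Char) (L : Nat) (i : Nat) :
    List (Int × String) → Option (List Int)
  | [] => none
  | p :: rest =>
      let st := pvZ_extend L i p.2.toList.length (p :: rest)
      let seg := PySem.List.slice pairs (some (i : Int)) (some ((st.1 : Int) + 1))
      if st.2 = L ∧ PySem.Chars.join [] (seg.map (fun pr => pr.2.toList)) = tgt then
        some (seg.map (·.1))
      else pvZ_scanI pairs tgt L (i + 1) rest

theorem refRest_eq_scanRun (tgt : List Char) : ∀ (ws : List (Int × String)) (c : List Char)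
    (q : Int × String), List.IsChain (fun a b => b.1 = a.1 + 1) (q :: ws) →
    refRest tgt c q.1 ws = scanRun tgt c ws := by
  intro ws
  induction ws with
  | nil => intro c q _; rfl
  | cons p r ih =>
    intro c q h
    obtain ⟨hr, hc⟩ := List.isChain_cons_cons.mp h
    obtain ⟨ix, w⟩ := p
    simp only [refRest, scanRun, if_pos hr]
    by_cases hct : c ++ w.toList = tgt
    · simp [hct]
    · simp [hct, ih _ _ hc]

theorem refRest_none (tgt : List Char) : ∀ (ws : List (Int × String)) (c : List Char) (prev : Int),
    tgt.length ≤ c.length → c ≠ tgt → refRest tgt c prev ws = none := by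
  intro ws
  induction ws with
  | nil => intro c prev _ _; rfl
  | cons p r ih =>
    intro c prev hlen hne
    obtain ⟨ix, w⟩ := p
    have hct : c ++ w.toList ≠ tgt := by
      intro h
      have h1 : c.length + w.toList.length = tgt.length := by
        simpa using congrArg List.length h
      have hw : w.toList = [] := by
        have : w.toList.length = 0 := by omega
        simpa using this
      rw [hw, List.append_nil] at h
      exact hne h
    by_cases hix : ix = prev + 1
    · simp only [refRest, if_pos hix, if_neg hct]
      rw [ih (c ++ w.toList) ix (by simp; omega) hct]
      rfl
    · simp [refRest, hix]

theorem getLastD_map_fst : ∀ (bs : List (Int × String)) (d : Int × String),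
    (bs.map Prod.fst).getLastD d.1 = (bs.getLastD d).1 := by
  intro bs
  induction bs with
  | nil => intro d; rfl
  | cons b t ih => intro d; simp only [List.map_cons, List.getLastD_cons]; exact ih b

theorem refRest_append (tgt : List Char) : ∀ (s : List (Int × String)) (c : List Char) (prev : Int)
    (rest : List (Int × String)),
    (∀ q ∈ rest.head?, q.1 ≠ (s.map Prod.fst).getLastD prev + 1) →
    refRest tgt c prev (s ++ rest) = refRest tgt c prev s := by
  intro s
  induction s with
  | nil =>
    intro c prev rest h
    cases rest with
    | nil => rfl
    | cons q r =>
      have hq : q.1 ≠ prev + 1 := by simpa using h q (by simp)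
      simp [refRest, hq]
  | cons p t ih =>
    intro c prev rest h
    obtain ⟨ix, w⟩ := p
    by_cases hix : ix = prev + 1
    · by_cases hct : c ++ w.toList = tgt
      · simp [refRest, hix, hct]
      · simp only [List.cons_append, refRest, if_pos hix, if_neg hct]
        rw [ih (c ++ w.toList) ix rest ?_]
        intro q hq
        have := h q hq
        rwa [List.map_cons, List.getLastD_cons] at this
    · simp [refRest, hix]

theorem refStart_append (tgt : List Char) (b : Int × String) (bs rest : List (Int × String))
    (h : ∀ q ∈ rest.head?, q.1 ≠ ((b :: bs).getLastD (0, "")).1 + 1) :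
    refStart tgt ((b :: bs) ++ rest) = refStart tgt (b :: bs) := by
  obtain ⟨ix, w⟩ := b
  by_cases hct : w.toList = tgt
  · simp [refStart, hct]
  · simp only [List.cons_append, refStart, if_neg hct]
    rw [refRest_append tgt bs w.toList ix rest ?_]
    intro q hq
    have := h q hq
    rw [List.getLastD_cons] at this
    rw [show (bs.map Prod.fst).getLastD ix = (bs.getLastD ((ix, w) : Int × String)).1 from
      getLastD_map_fst bs (ix, w)]
    exact this

theorem refScan_cons (tgt : List Char) (p : Int × String) (r : List (Int × String)) :
    refScan tgt (p :: r) = (refStart tgt (p :: r)).orElse (fun _ => refScan tgt r) := rfl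

theorem refScan_append (tgt : List Char) : ∀ (block rest : List (Int × String)),
    block ≠ [] →
    (∀ q ∈ rest.head?, q.1 ≠ (block.getLastD (0, "")).1 + 1) →
    refScan tgt (block ++ rest) = (refScan tgt block).orElse (fun _ => refScan tgt rest) := by
  intro block
  induction block with
  | nil => intro rest hne _; exact absurd rfl hne
  | cons b bs ih =>
    intro rest hne h
    cases rest with
    | nil =>
      rw [List.append_nil]
      cases refScan tgt (b :: bs)
      · simp [Option.orElse, refScan]
      · simp [Option.orElse]
    | cons q r =>
    cases bs with
    | nil =>
      show refScan tgt ([b] ++ (q :: r)) = _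
      rw [show ([b] ++ (q :: r)) = b :: (q :: r) from rfl, refScan_cons tgt b (q :: r),
        show (b :: (q :: r)) = [b] ++ (q :: r) from rfl, refStart_append tgt b [] (q :: r) h,
        refScan_cons tgt b []]
      cases hs : refStart tgt [b] <;> simp [Option.orElse, refScan]
    | cons b2 t =>
      show refScan tgt (b :: ((b2 :: t) ++ (q :: r))) = _
      rw [refScan_cons tgt b ((b2 :: t) ++ (q :: r)),
        show (b :: ((b2 :: t) ++ (q :: r))) = (b :: b2 :: t) ++ (q :: r) from rfl,
        refStart_append tgt b (b2 :: t) (q :: r) h,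
        ih (q :: r) (by simp) ?hlast,
        refScan_cons tgt b (b2 :: t)]
      case hlast =>
        intro p hp
        have := h p hp
        rwa [List.getLastD_cons] at this
      cases hx : refStart tgt (b :: b2 :: t) <;> cases hy : refScan tgt (b2 :: t) <;>
        simp [Option.orElse]

theorem search_append (tgt : List Char) : ∀ (g1 g2 : List (List Int × List String)),
    pvA_search (g1 ++ g2) tgt = (pvA_search g1 tgt).orElse (fun _ => pvA_search g2 tgt) := by
  intro g1 g2
  induction g1 with
  | nil => simp [pvA_search, Option.orElse]
  | cons g gs ih =>
    obtain ⟨gi, gw⟩ := g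
    simp only [List.cons_append, pvA_search]
    cases hs : pvA_scanI gi tgt 0 gw <;> simp [Option.orElse, ih]

-- one step of the take, used to push the found word onto the slice on both sides
theorem take_drop_succ {α : Type} : ∀ (l : List α) (i j : Nat), i ≤ j → (h : j < l.length) →
    (l.drop i).take (j + 1 - i) = (l.drop i).take (j - i) ++ [l[j]] := by
  intro l i j hij h
  have h1 : j + 1 - i = (j - i) + 1 := by omega
  rw [h1, List.take_add_one, List.getElem?_drop]
  have h2 : i + (j - i) = j := by omega
  rw [h2, List.getElem?_eq_getElem h]
  rfl

theorem scanJ_eq (tgt : List Char) (block : List (Int × String)) :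
    ∀ (sfx : List (Int × String)) (j : Nat) (c : List Char) (i : Nat), i ≤ j →
    sfx = block.drop j →
    pvA_scanJ (block.map Prod.fst) tgt i j c (sfx.map Prod.snd)
      = (scanRun tgt c sfx).map
          (fun t => ((block.map Prod.fst).drop i).take (j - i) ++ t) := by
  intro sfx
  induction sfx with
  | nil => intro j c i _ _; rfl
  | cons p r ih =>
    intro j c i hij hdrop
    obtain ⟨ix, w⟩ := p
    have hlen := congrArg List.length hdrop
    simp only [List.length_cons, List.length_drop] at hlen
    have hj : j < block.length := by omega
    have hbj : block[j]'hj = (ix, w) := by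
      have h0 : (block.drop j)[0]? = some (ix, w) := by rw [← hdrop]; rfl
      rw [List.getElem?_drop] at h0
      have h1 := List.getElem?_eq_getElem (l := block) (i := j + 0) (by omega)
      rw [h0] at h1
      have h2 : some (ix, w) = some (block[j]'hj) := by
        simpa using h1
      exact (Option.some_inj.mp h2).symm
    have hr : block.drop (j + 1) = r := by
      have : block.drop (j + 1) = (block.drop j).drop 1 := by
        rw [List.drop_drop]
      rw [this, ← hdrop, List.drop_one, List.tail_cons]
    have hjf : j < (block.map Prod.fst).length := by simpa using hj
    have hstep : ((block.map Prod.fst).drop i).take (j + 1 - i)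
        = ((block.map Prod.fst).drop i).take (j - i) ++ [ix] := by
      rw [take_drop_succ (block.map Prod.fst) i j hij hjf]
      simp [hbj]
    simp only [List.map_cons, pvA_scanJ, scanRun]
    by_cases hct : c ++ w.toList = tgt
    · rw [if_pos hct, if_pos hct]
      have hcast : ((j : Int) + 1) = ((j + 1 : Nat) : Int) := by push_cast; ring
      rw [hcast, PySem.List.slice_natCast]
      simp [hstep]
    · rw [if_neg hct, if_neg hct]
      rw [ih (j + 1) (c ++ w.toList) i (by omega) hr.symm]
      cases scanRun tgt (c ++ w.toList) r <;> simp [hstep]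

theorem scanI_eq (tgt : List Char) (block : List (Int × String))
    (hrun : List.IsChain (fun a b => b.1 = a.1 + 1) block) :
    ∀ (sfx : List (Int × String)) (i : Nat), sfx = block.drop i →
    pvA_scanI (block.map Prod.fst) tgt i (sfx.map Prod.snd) = refScan tgt sfx := by
  intro sfx
  induction sfx with
  | nil => intro i _; rfl
  | cons p r ih =>
    intro i hdrop
    obtain ⟨ix, w⟩ := p
    have hlen := congrArg List.length hdrop
    simp only [List.length_cons, List.length_drop] at hlen
    have hr : block.drop (i + 1) = r := by
      have : block.drop (i + 1) = (block.drop i).drop 1 := by rw [List.drop_drop]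
      rw [this, ← hdrop, List.drop_one, List.tail_cons]
    have hchain : List.IsChain (fun a b => b.1 = a.1 + 1) ((ix, w) :: r) := by
      have := hrun.drop i
      rwa [← hdrop] at this
    have hJ := scanJ_eq tgt block ((ix, w) :: r) i [] i le_rfl hdrop
    simp only [List.map_cons] at hJ ⊢
    simp only [pvA_scanI]
    rw [hJ]
    have hsr : scanRun tgt [] ((ix, w) :: r)
        = if w.toList = tgt then some [ix] else (scanRun tgt w.toList r).map (ix :: ·) := by
      simp [scanRun]
    rw [refScan_cons]
    have hstart : refStart tgt ((ix, w) :: r)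
        = if w.toList = tgt then some [ix] else (scanRun tgt w.toList r).map (ix :: ·) := by
      simp only [refStart]
      by_cases hct : w.toList = tgt
      · rw [if_pos hct, if_pos hct]
      · rw [if_neg hct, if_neg hct,
          refRest_eq_scanRun tgt r w.toList (ix, w) hchain]
    rw [hstart, ← hsr]
    rw [ih (i + 1) hr.symm]
    cases scanRun tgt [] ((ix, w) :: r) <;> simp [Option.orElse]

theorem search_single (tgt : List Char) (cur : List (Int × String))
    (hchain : List.IsChain (fun a b => b.1 = a.1 + 1) cur) :
    pvA_search [(cur.map Prod.fst, cur.map Prod.snd)] tgt = refScan tgt cur := by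
  simp only [pvA_search]
  rw [scanI_eq tgt cur hchain cur 0 (List.drop_zero).symm]
  cases refScan tgt cur <;> rfl

theorem groupSearch (tgt : List Char) : ∀ (rest : List (Int × String)) (prev : Int)
    (groups : List (List Int × List String)) (cur : List (Int × String)),
    cur ≠ [] → List.IsChain (fun a b => b.1 = a.1 + 1) cur →
    (cur.getLastD (0, "")).1 = prev →
    pvA_search (pvA_group prev rest groups (cur.map Prod.fst) (cur.map Prod.snd)) tgt
      = (pvA_search groups tgt).orElse (fun _ => refScan tgt (cur ++ rest)) := by
  intro rest
  induction rest with
  | nil =>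
    intro prev groups cur hne hchain hlast
    show pvA_search (groups ++ [(cur.map Prod.fst, cur.map Prod.snd)]) tgt = _
    rw [search_append, search_single tgt cur hchain, List.append_nil]
  | cons p r ih =>
    intro prev groups cur hne hchain hlast
    obtain ⟨ix, w⟩ := p
    by_cases hix : ix = prev + 1
    · have hgroup : pvA_group prev ((ix, w) :: r) groups (cur.map Prod.fst) (cur.map Prod.snd)
          = pvA_group ix r groups ((cur ++ [(ix, w)]).map Prod.fst)
              ((cur ++ [(ix, w)]).map Prod.snd) := by
        simp [pvA_group, hix]
      rw [hgroup, ih ix groups (cur ++ [(ix, w)]) (by simp) ?chain (by simp)]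
      case chain =>
        refine List.isChain_append.mpr ⟨hchain, List.IsChain.singleton _, ?_⟩
        intro x hx y hy
        have hy' : y = (ix, w) := by simpa using hy.symm
        have hx' : cur.getLastD (0, "") = x := by
          rw [List.getLastD_eq_getLast?, Option.mem_def.mp hx]
          rfl
        subst hy'
        show (ix, w).1 = x.1 + 1
        rw [← hx', hlast]
        exact hix
      rw [List.append_assoc]
      rfl
    · have hgroup : pvA_group prev ((ix, w) :: r) groups (cur.map Prod.fst) (cur.map Prod.snd)
          = pvA_group ix r (groups ++ [(cur.map Prod.fst, cur.map Prod.snd)]) [ix] [w] := by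
        simp [pvA_group, hix]
      rw [hgroup]
      have hih := ih ix (groups ++ [(cur.map Prod.fst, cur.map Prod.snd)]) [(ix, w)]
        (by simp) (List.IsChain.singleton _) (by simp)
      simp only [List.map_cons, List.map_nil] at hih
      rw [hih, search_append tgt groups [(cur.map Prod.fst, cur.map Prod.snd)],
        search_single tgt cur hchain]
      rw [refScan_append tgt cur ((ix, w) :: r) hne ?hd]
      case hd =>
        intro q hq
        have hq' : q = (ix, w) := by simpa using hq.symm
        subst hq'
        rw [hlast]
        exact hix
      cases pvA_search groups tgt <;> cases refScan tgt cur <;> simp [Option.orElse]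

-- concatenation of the words of a pair segment
def cw (s : List (Int × String)) : List Char := (s.map (fun p => p.2.toList)).flatten

theorem join_nil_flatten : ∀ (parts : List (List Char)),
    PySem.Chars.join [] parts = parts.flatten := by
  intro parts
  induction parts with
  | nil => rfl
  | cons a r ih =>
    cases r with
    | nil => simp [PySem.Chars.join_singleton]
    | cons b t => rw [PySem.Chars.join_cons_cons]; simp_all

theorem extend_stop : ∀ (s : List (Int × String)) (L j total : Nat), L ≤ total →
    pvZ_extend L j total s = (j, total) := by
  intro s L j total h
  match s with
  | [] => rfl
  | [p] => rfl
  | p0 :: p1 :: r =>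
    simp only [pvZ_extend]
    rw [if_neg (fun hx => absurd hx.1 (by omega))]

theorem head_drop {α : Type} (l : List α) (j : Nat) (x : α) (t : List α)
    (h : l.drop j = x :: t) (hj : j < l.length) : l[j] = x := by
  have h0 : (l.drop j)[0]? = some x := by rw [h]; rfl
  rw [List.getElem?_drop] at h0
  have h1 := List.getElem?_eq_getElem (l := l) (i := j + 0) (by omega)
  rw [h0] at h1
  have h2 : some x = some (l[j]'hj) := by simpa using h1
  exact (Option.some_inj.mp h2).symm

theorem drop_succ_of_drop {α : Type} (l : List α) (j : Nat) (x : α) (t : List α)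
    (h : l.drop j = x :: t) : l.drop (j + 1) = t := by
  have h1 : l.drop (j + 1) = (l.drop j).drop 1 := by rw [List.drop_drop]
  rw [h1, h, List.drop_one, List.tail_cons]

theorem cw_append (s t : List (Int × String)) : cw (s ++ t) = cw s ++ cw t := by
  simp [cw]

theorem cw_single (p : Int × String) : cw [p] = p.2.toList := by simp [cw]

theorem cw_take_succ (pairs : List (Int × String)) (i k : Nat) (hik : i ≤ k)
    (hk : k < pairs.length) :
    cw ((pairs.drop i).take (k + 1 - i)) = cw ((pairs.drop i).take (k - i)) ++ pairs[k].2.toList := by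
  rw [take_drop_succ pairs i k hik hk, cw_append, cw_single]

theorem extend_eq (tgt : List Char) (pairs : List (Int × String)) :
    ∀ (sfx : List (Int × String)) (j : Nat) (c : List Char) (i : Nat), i ≤ j →
    (hj : j < pairs.length) → sfx = pairs.drop j →
    c = cw ((pairs.drop i).take (j + 1 - i)) → c ≠ tgt →
    (if (pvZ_extend tgt.length j c.length sfx).2 = tgt.length ∧
        cw ((pairs.drop i).take ((pvZ_extend tgt.length j c.length sfx).1 + 1 - i)) = tgt then
       some (((pairs.drop i).take ((pvZ_extend tgt.length j c.length sfx).1 + 1 - i)).map Prod.fst)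
     else none)
      = (refRest tgt c (pairs[j].1) (pairs.drop (j + 1))).map
          (fun t => (((pairs.drop i).take (j + 1 - i)).map Prod.fst) ++ t) := by
  intro sfx
  induction sfx with
  | nil =>
    intro j c i hij hj hdrop _ _
    exfalso
    have := congrArg List.length hdrop
    simp [List.length_drop] at this
    omega
  | cons p0 tail ih =>
    cases tail with
    | nil =>
      intro j c i hij hj hdrop hc hcne
      have hdrop1 : pairs.drop (j + 1) = [] := drop_succ_of_drop pairs j p0 [] hdrop.symm
      rw [show pvZ_extend tgt.length j c.length [p0] = (j, c.length) from rfl]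
      dsimp only
      rw [if_neg (fun hx => hcne (hc.trans hx.2)), hdrop1]
      rfl
    | cons p1 r =>
      intro j c i hij hj hdrop hc hcne
      have hp0 : pairs[j] = p0 := head_drop pairs j p0 (p1 :: r) hdrop.symm hj
      have hdrop1 : pairs.drop (j + 1) = p1 :: r := drop_succ_of_drop pairs j p0 (p1 :: r) hdrop.symm
      have hj1 : j + 1 < pairs.length := by
        have := congrArg List.length hdrop1
        simp [List.length_drop] at this
        omega
      have hp1 : pairs[j + 1] = p1 := head_drop pairs (j + 1) p1 r hdrop1 hj1
      have hdrop2 : pairs.drop (j + 2) = r := drop_succ_of_drop pairs (j + 1) p1 r hdrop1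
      rw [hdrop1]
      by_cases hcons : p1.1 = p0.1 + 1
      · by_cases hlt : c.length < tgt.length
        · have hext : pvZ_extend tgt.length j c.length (p0 :: p1 :: r)
              = pvZ_extend tgt.length (j + 1) (c.length + p1.2.toList.length) (p1 :: r) := by
            simp only [pvZ_extend]
            rw [if_pos ⟨hlt, hcons⟩]
          rw [hext]
          have hc' : c ++ p1.2.toList = cw ((pairs.drop i).take (j + 1 + 1 - i)) := by
            rw [cw_take_succ pairs i (j + 1) (by omega) hj1, hp1, ← hc]
          have htk : ((pairs.drop i).take (j + 1 + 1 - i)).map Prod.fst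
              = ((pairs.drop i).take (j + 1 - i)).map Prod.fst ++ [p1.1] := by
            rw [take_drop_succ pairs i (j + 1) (by omega) hj1, List.map_append, hp1]
            rfl
          by_cases hct : c ++ p1.2.toList = tgt
          · have hlen' : c.length + p1.2.toList.length = tgt.length := by
              have := congrArg List.length hct
              simpa using this
            rw [extend_stop (p1 :: r) tgt.length (j + 1) _ (by omega)]
            dsimp only
            rw [if_pos ⟨hlen', by rw [← hc']; exact hct⟩]
            simp only [refRest, if_pos (hp0 ▸ hcons : p1.1 = pairs[j].1 + 1), if_pos hct]
            rw [htk]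
            simp
          · have hlen2 : c.length + p1.2.toList.length = (c ++ p1.2.toList).length := by simp
            rw [hlen2]
            rw [ih (j + 1) (c ++ p1.2.toList) i (by omega) hj1 hdrop1.symm hc' hct]
            simp only [refRest, if_pos (hp0 ▸ hcons : p1.1 = pairs[j].1 + 1), if_neg hct]
            rw [hp1, hdrop2]
            cases refRest tgt (c ++ p1.2.toList) p1.1 r <;> simp [htk]
        · have hext : pvZ_extend tgt.length j c.length (p0 :: p1 :: r) = (j, c.length) := by
            simp only [pvZ_extend]
            rw [if_neg (fun hx => hlt hx.1)]
          rw [hext]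
          dsimp only
          rw [if_neg (fun hx => hcne (hc.trans hx.2))]
          simp only [refRest, if_pos (hp0 ▸ hcons : p1.1 = pairs[j].1 + 1)]
          by_cases hct : c ++ p1.2.toList = tgt
          · exfalso
            have h1 : c.length + p1.2.toList.length = tgt.length := by
              have := congrArg List.length hct
              simpa using this
            have hw : p1.2.toList = [] := by
              have : p1.2.toList.length = 0 := by omega
              simpa using this
            rw [hw, List.append_nil] at hct
            exact hcne hct
          · rw [if_neg hct]
            rw [refRest_none tgt r (c ++ p1.2.toList) p1.1 (by simp; omega) hct]
            rfl
      · have hext : pvZ_extend tgt.length j c.length (p0 :: p1 :: r) = (j, c.length) := by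
          simp only [pvZ_extend]
          rw [if_neg (fun hx => hcons hx.2)]
        rw [hext]
        dsimp only
        rw [if_neg (fun hx => hcne (hc.trans hx.2))]
        simp only [refRest]
        rw [if_neg (by rw [hp0]; exact hcons)]
        rfl

theorem scanZ_eq (tgt : List Char) (pairs : List (Int × String)) :
    ∀ (sfx : List (Int × String)) (i : Nat), sfx = pairs.drop i →
    pvZ_scanI pairs tgt tgt.length i sfx = refScan tgt sfx := by
  intro sfx
  induction sfx with
  | nil => intro i _; rfl
  | cons p rest ih =>
    intro i hdrop
    obtain ⟨ix, w⟩ := p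
    have hlen := congrArg List.length hdrop
    simp only [List.length_cons, List.length_drop] at hlen
    have hi : i < pairs.length := by omega
    have hp : pairs[i] = (ix, w) := head_drop pairs i (ix, w) rest hdrop.symm hi
    have hdrop1 : pairs.drop (i + 1) = rest := drop_succ_of_drop pairs i (ix, w) rest hdrop.symm
    have hseg1 : (pairs.drop i).take (i + 1 - i) = [(ix, w)] := by
      have h1 : i + 1 - i = 1 := by omega
      rw [h1, ← hdrop]
      rfl
    simp only [pvZ_scanI]
    rw [show ((pvZ_extend tgt.length i w.toList.length ((ix, w) :: rest)).1 : Int) + 1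
        = (((pvZ_extend tgt.length i w.toList.length ((ix, w) :: rest)).1 + 1 : Nat) : Int) by
      push_cast; ring]
    rw [PySem.List.slice_natCast, join_nil_flatten]
    rw [show (List.map (fun pr => pr.2.toList)
        ((pairs.drop i).take ((pvZ_extend tgt.length i w.toList.length ((ix, w) :: rest)).1 + 1 - i))).flatten
        = cw ((pairs.drop i).take ((pvZ_extend tgt.length i w.toList.length ((ix, w) :: rest)).1 + 1 - i))
      from rfl]
    by_cases hct : w.toList = tgt
    · have hstop : pvZ_extend tgt.length i w.toList.length ((ix, w) :: rest)
          = (i, w.toList.length) := extend_stop _ _ _ _ (by rw [hct])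
      rw [hstop]
      dsimp only
      rw [hseg1]
      rw [if_pos ⟨by rw [hct], by rw [cw_single]; exact hct⟩]
      rw [refScan_cons]
      simp [refStart, hct, Option.orElse]
    · have hcX : w.toList = cw ((pairs.drop i).take (i + 1 - i)) := by
        rw [hseg1, cw_single]
      have key := extend_eq tgt pairs ((ix, w) :: rest) i w.toList i le_rfl hi hdrop hcX hct
      rw [hp, hdrop1, hseg1] at key
      simp only [List.map_cons, List.map_nil, List.singleton_append] at key
      rw [show (w.toList.length : Nat) = w.toList.length from rfl] at key
      by_cases hcond : (pvZ_extend tgt.length i w.toList.length ((ix, w) :: rest)).2 = tgt.length ∧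
          cw ((pairs.drop i).take
            ((pvZ_extend tgt.length i w.toList.length ((ix, w) :: rest)).1 + 1 - i)) = tgt
      · rw [if_pos hcond] at key ⊢
        cases h : refRest tgt w.toList ix rest with
        | none => rw [h] at key; simp at key
        | some t =>
          rw [h] at key
          simp only [Option.map_some] at key
          rw [key, refScan_cons]
          simp [refStart, hct, h, Option.orElse]
      · rw [if_neg hcond] at key ⊢
        rw [ih (i + 1) hdrop1.symm, refScan_cons]
        have hnone : refRest tgt w.toList ix rest = none := by
          cases h : refRest tgt w.toList ix rest with
          | none => rfl
          | some t => rw [h] at key; simp at key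
        simp [refStart, hct, hnone, Option.orElse]

-- ===== bridge: the index-based port B equals the pair-level model under Pre_ =====

theorem zip_drop' : ∀ (as_ : List Int) (bs : List String) (i : Nat),
    (as_.zip bs).drop i = (as_.drop i).zip (bs.drop i) := by
  intro as_
  induction as_ with
  | nil => intro bs i; simp
  | cons a t ih =>
    intro bs i
    cases bs with
    | nil => simp
    | cons b u =>
      cases i with
      | zero => simp
      | succ n => simp only [List.zip_cons_cons, List.drop_succ_cons]; exact ih u n

theorem zip_take' : ∀ (as_ : List Int) (bs : List String) (i : Nat),
    (as_.zip bs).take i = (as_.take i).zip (bs.take i) := by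
  intro as_
  induction as_ with
  | nil => intro bs i; simp
  | cons a t ih =>
    intro bs i
    cases bs with
    | nil => simp
    | cons b u =>
      cases i with
      | zero => simp
      | succ n => simp only [List.zip_cons_cons, List.take_succ_cons]; rw [ih u n]

theorem zip_getElem (as_ : List Int) (bs : List String) (i : Nat)
    (h1 : i < as_.length) (h2 : i < bs.length) :
    (as_.zip bs)[i]'(by rw [List.length_zip]; omega) = (as_[i], bs[i]) := by
  exact List.getElem_zip

-- pvB_extend's result index stays within [j, idx.length) when it starts there
theorem extend_fst_bounds (idx : List Int) (dw : List String) (L : Nat) :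
    ∀ (k j total : Nat), idx.length - j ≤ k → j < idx.length →
    j ≤ (pvB_extend idx dw L j total).1 ∧ (pvB_extend idx dw L j total).1 < idx.length := by
  intro k
  induction k with
  | zero => intro j total hk hj; omega
  | succ k ih =>
    intro j total hk hj
    by_cases h1 : j + 1 < idx.length
    · rw [pvB_extend, dif_pos h1]
      by_cases h2 : total < L ∧ idx[j+1]?.getD 0 = idx[j]?.getD 0 + 1
      · rw [if_pos h2]
        have := ih (j + 1) (total + (dw[j+1]?.getD "").toList.length) (by omega) h1
        omega
      · rw [if_neg h2]; exact ⟨le_refl j, hj⟩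
    · rw [pvB_extend, dif_neg h1]; exact ⟨le_refl j, hj⟩

theorem extend_bridge (idx : List Int) (dw : List String) (hlen : idx.length ≤ dw.length)
    (L : Nat) : ∀ (k j total : Nat), idx.length - j ≤ k →
    pvB_extend idx dw L j total = pvZ_extend L j total ((idx.zip dw).drop j) := by
  have hzlen : (idx.zip dw).length = idx.length := by
    rw [List.length_zip]; omega
  intro k
  induction k with
  | zero =>
    intro j total hk
    have hdrop : (idx.zip dw).drop j = [] := by
      apply List.drop_eq_nil_of_le; omega
    rw [hdrop, pvB_extend, dif_neg (by omega)]
    rfl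
  | succ k ih =>
    intro j total hk
    by_cases h1 : j + 1 < idx.length
    · have hj : j < (idx.zip dw).length := by omega
      have hj1 : j + 1 < (idx.zip dw).length := by omega
      have hd0 : (idx.zip dw).drop j = (idx.zip dw)[j] :: (idx.zip dw).drop (j + 1) :=
        List.drop_eq_getElem_cons hj
      have hd1 : (idx.zip dw).drop (j + 1) = (idx.zip dw)[j+1] :: (idx.zip dw).drop (j + 2) :=
        List.drop_eq_getElem_cons hj1
      have hgj : (idx.zip dw)[j]'hj = (idx[j]'(by omega), dw[j]'(by omega)) :=
        zip_getElem idx dw j (by omega) (by omega)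
      have hgj1 : (idx.zip dw)[j+1]'hj1 = (idx[j+1]'h1, dw[j+1]'(by omega)) :=
        zip_getElem idx dw (j+1) (by omega) (by omega)
      have hget : idx[j+1]?.getD 0 = idx[j+1]'h1 := by
        rw [List.getElem?_eq_getElem h1]; rfl
      have hget0 : idx[j]?.getD 0 = idx[j]'(by omega : j < idx.length) := by
        rw [List.getElem?_eq_getElem]; rfl
      have hgetw : (dw[j+1]?.getD "") = dw[j+1]'(by omega : j + 1 < dw.length) := by
        rw [List.getElem?_eq_getElem]; rfl
      rw [hd0, hd1, pvB_extend, dif_pos h1]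
      by_cases h2 : total < L ∧ idx[j+1]?.getD 0 = idx[j]?.getD 0 + 1
      · rw [if_pos h2]
        have hZcond : total < L ∧ ((idx.zip dw)[j+1]'hj1).1 = ((idx.zip dw)[j]'hj).1 + 1 := by
          rw [hgj, hgj1]
          exact ⟨h2.1, by rw [← hget, ← hget0]; exact h2.2⟩
        rw [show pvZ_extend L j total ((idx.zip dw)[j] :: (idx.zip dw)[j+1] :: (idx.zip dw).drop (j + 2))
            = pvZ_extend L (j + 1) (total + ((idx.zip dw)[j+1]'hj1).2.toList.length)
                ((idx.zip dw)[j+1] :: (idx.zip dw).drop (j + 2)) by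
          simp only [pvZ_extend]; rw [if_pos hZcond]]
        rw [← hd1, ih (j + 1) (total + (dw[j+1]?.getD "").toList.length) (by omega)]
        rw [hgj1, hgetw]
      · rw [if_neg h2]
        have hZcond : ¬ (total < L ∧ ((idx.zip dw)[j+1]'hj1).1 = ((idx.zip dw)[j]'hj).1 + 1) := by
          rw [hgj, hgj1]
          intro hx
          exact h2 ⟨hx.1, by rw [hget, hget0]; exact hx.2⟩
        simp only [pvZ_extend]
        rw [if_neg hZcond]
    · rw [pvB_extend, dif_neg h1]
      match hd : (idx.zip dw).drop j with
      | [] => rfl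
      | [p] => rfl
      | p0 :: p1 :: r =>
        exfalso
        have := congrArg List.length hd
        simp only [List.length_drop, List.length_cons] at this
        omega

theorem scan_bridge (idx : List Int) (dw : List String) (hlen : idx.length ≤ dw.length)
    (tgt : List Char) : ∀ (k i : Nat), idx.length - i ≤ k →
    pvB_scan idx dw tgt tgt.length i
      = pvZ_scanI (idx.zip dw) tgt tgt.length i ((idx.zip dw).drop i) := by
  have hzlen : (idx.zip dw).length = idx.length := by rw [List.length_zip]; omega
  intro k
  induction k with
  | zero =>
    intro i hk
    have hdrop : (idx.zip dw).drop i = [] := List.drop_eq_nil_of_le (by omega)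
    rw [hdrop, pvB_scan, dif_neg (by omega)]
    rfl
  | succ k ih =>
    intro i hk
    by_cases h1 : i < idx.length
    · have hi : i < (idx.zip dw).length := by omega
      have hd0 : (idx.zip dw).drop i = (idx.zip dw)[i] :: (idx.zip dw).drop (i + 1) :=
        List.drop_eq_getElem_cons hi
      have hgi : (idx.zip dw)[i]'hi = (idx[i]'h1, dw[i]'(by omega)) :=
        zip_getElem idx dw i (by omega) (by omega)
      have hgetw : (dw[i]?.getD "") = dw[i]'(by omega : i < dw.length) := by
        rw [List.getElem?_eq_getElem]; rfl
      rw [hd0]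
      simp only [pvZ_scanI]
      rw [← hd0]
      have hE : pvB_extend idx dw tgt.length i (dw[i]?.getD "").toList.length
          = pvZ_extend tgt.length i ((idx.zip dw)[i]'hi).2.toList.length ((idx.zip dw).drop i) := by
        rw [extend_bridge idx dw hlen tgt.length (idx.length - i) i _ (le_refl _), hgi, hgetw]
      set st := pvZ_extend tgt.length i ((idx.zip dw)[i]'hi).2.toList.length ((idx.zip dw).drop i)
        with hst
      -- bounds on the run end
      have hbounds : i ≤ (pvB_extend idx dw tgt.length i (dw[i]?.getD "").toList.length).1 ∧
          (pvB_extend idx dw tgt.length i (dw[i]?.getD "").toList.length).1 < idx.length :=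
        extend_fst_bounds idx dw tgt.length (idx.length - i) i _ (le_refl _) h1
      rw [hE] at hbounds
      -- the three slices taken over the zip, idx and dw agree on this in-range segment
      have hm : i + (st.1 + 1 - i) ≤ idx.length := by omega
      have hcast : ((st.1 : Int) + 1) = ((st.1 + 1 : Nat) : Int) := by push_cast; ring
      have hsegz : PySem.List.slice (idx.zip dw) (some (i : Int)) (some ((st.1 : Int) + 1))
          = ((idx.drop i).take (st.1 + 1 - i)).zip ((dw.drop i).take (st.1 + 1 - i)) := by
        rw [hcast, PySem.List.slice_natCast, zip_drop', zip_take']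
      have hlenf : ((idx.drop i).take (st.1 + 1 - i)).length = st.1 + 1 - i := by
        simp [List.length_take, List.length_drop]; omega
      have hlens : ((dw.drop i).take (st.1 + 1 - i)).length = st.1 + 1 - i := by
        simp [List.length_take, List.length_drop]; omega
      have hfst : (PySem.List.slice (idx.zip dw) (some (i : Int)) (some ((st.1 : Int) + 1))).map Prod.fst
          = PySem.List.slice idx (some (i : Int)) (some ((st.1 : Int) + 1)) := by
        rw [hsegz, List.map_fst_zip (by rw [hlenf, hlens]), hcast, PySem.List.slice_natCast]
      have hsnd : (PySem.List.slice (idx.zip dw) (some (i : Int)) (some ((st.1 : Int) + 1))).map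
            (fun pr => pr.2.toList)
          = (PySem.List.slice dw (some (i : Int)) (some ((st.1 : Int) + 1))).map String.toList := by
        have : (PySem.List.slice (idx.zip dw) (some (i : Int)) (some ((st.1 : Int) + 1))).map
              (fun pr => pr.2.toList)
            = ((PySem.List.slice (idx.zip dw) (some (i : Int)) (some ((st.1 : Int) + 1))).map
                Prod.snd).map String.toList := by
          rw [List.map_map]; rfl
        rw [this, hsegz, List.map_snd_zip (by rw [hlenf, hlens]), hcast, PySem.List.slice_natCast]
      rw [pvB_scan, dif_pos h1]
      simp only
      rw [hE, ← hsnd, ← hfst]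
      by_cases hcond : st.2 = tgt.length ∧ PySem.Chars.join []
          ((PySem.List.slice (idx.zip dw) (some (i : Int)) (some ((st.1 : Int) + 1))).map
            (fun pr => pr.2.toList)) = tgt
      · rw [if_pos hcond, if_pos hcond]
      · rw [if_neg hcond, if_neg hcond]
        exact ih (i + 1) (by omega)
    · rw [pvB_scan, dif_neg h1]
      have hdrop : (idx.zip dw).drop i = [] := List.drop_eq_nil_of_le (by omega)
      rw [hdrop]
      rfl

-- ===== VERDICT (by name: the statement is the Claim_ definition above) =====
theorem find_matching_indices_spec : Claim_equal_find_matching_indices := by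
  unfold Claim_equal_find_matching_indices
  intro indices dw tw _dom hpre
  unfold Spec_find_matching_indices find_matching_indices find_matching_indices_alt
  cases indices with
  | nil => rfl
  | cons i0 ir =>
    cases dw with
    | nil => rfl
    | cons w0 wr =>
      have hlen : (i0 :: ir).length ≤ (w0 :: wr).length := by
        rcases hpre with h | h | h
        · exact absurd h (by simp)
        · exact absurd h (by simp)
        · exact h
      dsimp only
      rw [show ((i0 :: ir).isEmpty || (w0 :: wr).isEmpty) = false from rfl]
      simp only [Bool.false_eq_true, if_false]
      have hzip : (i0 :: ir).zip (w0 :: wr) = (i0, w0) :: ir.zip wr := rfl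
      rw [hzip, List.tail_cons]
      have hA := groupSearch (PySem.Chars.replace tw.toList [' '] []) (ir.zip wr) i0 []
        [(i0, w0)] (by simp) (List.IsChain.singleton _) (by simp)
      simp only [List.map_cons, List.map_nil] at hA
      rw [hA]
      have hB := scan_bridge (i0 :: ir) (w0 :: wr) hlen
        (PySem.Chars.replace tw.toList [' '] []) (i0 :: ir).length 0 (by omega)
      rw [hB, hzip, List.drop_zero]
      rw [scanZ_eq (PySem.Chars.replace tw.toList [' '] []) ((i0, w0) :: ir.zip wr)
        ((i0, w0) :: ir.zip wr) 0 (List.drop_zero).symm]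
      have : pvA_search [] (PySem.Chars.replace tw.toList [' '] []) = none := rfl
      rw [this]
      rfl
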